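-- pv_equiv track=rewrite | github.com/INMANLab/BLAES_Objects-Scenes_Manuscript_Wahlstrom | MNE Utils/prepro_utils.py | select_BLAES_macros
-- ===== SOURCE A (Python) =====
-- def select_BLAES_macros(chanLabels):
--
--     # Sometimes in BCI2000
--     miscLabels = ['GND', 'PD', 'Sync', 'EMPTY', 'REF', 'EKG', 'chan', '_']
--     DCChans = [s for s in chanLabels if s.startswith('DC')]
--
--     # Defined per EEG montage
--     EEGLabels = ['FP1', 'Fp1', 'AF3', 'F3', 'F7', 'F9', 'FC5', 'FC1', 'FP2', 'Fp2', 'AF4', 'F4', 'F8', 'F10', 'FC6', 'FC2', 'T7', 'C3', 'CP5', 'CP1', 'P3', 'P7', 'PO3', 'PO7', 'T8', 'C4', 'CP6', 'CP2', 'P4', 'P8', 'PO4', 'PO8', 'O1', 'O2', 'A1', 'A2', 'FZ', 'CZ', 'PZ', 'FPZ', 'OZ', 'Cz', 'Fz', 'Pz', 'Oz']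
--
--     # Check for alternatve WashU naming convention
--     NameType = []
--     for i in range(len(chanLabels)):
--         if "L" in chanLabels[i] or "R" in chanLabels[i]:
--             NameType.append(1)
--         else:
--             NameType.append(0)
--     if (sum(NameType) / len(NameType)) < 0.5:
--         EEGLabels = [s.lower() for s in EEGLabels]
--         EEGLabels = EEGLabels = ['Fp1', 'Fp2', 'CZ', 'Cz', 'FPZ', 'FZ', 'Fz', 'PZ', 'Pz', 'OZ', 'Oz', 'T7', 'T8']
--
--     # Separate non-macro labels
--     EEGChans = [s for s in chanLabels if any(xs == s for xs in EEGLabels)]      # EEG channels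
--     miscChans = [s for s in chanLabels if any(xs in s for xs in miscLabels)]    # misc BCI2000 channels
--     microChans = [s for s in chanLabels if 'm' in s]                            # microelectrode channels
--     specialChans = EEGChans + microChans + miscChans + DCChans                  # remove all of the above
--
--     # Grab indices of channels to keep
--     keepChanIdxs = [i for i, s in enumerate(chanLabels) if s not in specialChans]
--
--     return keepChanIdxs
-- ===== SOURCE B (Python) =====
-- def select_BLAES_macros(chanLabels):
--     # One pass with a combined "is special" predicate instead of building
--     # four category lists and testing membership in their concatenation.
--     miscLabels = ['GND', 'PD', 'Sync', 'EMPTY', 'REF', 'EKG', 'chan', '_']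
--     fullEEG = ['FP1', 'Fp1', 'AF3', 'F3', 'F7', 'F9', 'FC5', 'FC1', 'FP2', 'Fp2', 'AF4', 'F4', 'F8', 'F10', 'FC6', 'FC2', 'T7', 'C3', 'CP5', 'CP1', 'P3', 'P7', 'PO3', 'PO7', 'T8', 'C4', 'CP6', 'CP2', 'P4', 'P8', 'PO4', 'PO8', 'O1', 'O2', 'A1', 'A2', 'FZ', 'CZ', 'PZ', 'FPZ', 'OZ', 'Cz', 'Fz', 'Pz', 'Oz']
--     reducedEEG = ['Fp1', 'Fp2', 'CZ', 'Cz', 'FPZ', 'FZ', 'Fz', 'PZ', 'Pz', 'OZ', 'Oz', 'T7', 'T8']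
--     lr = sum(1 for s in chanLabels if 'L' in s or 'R' in s)
--     EEGLabels = fullEEG if 2 * lr >= len(chanLabels) else reducedEEG
--     keep = []
--     for i, s in enumerate(chanLabels):
--         special = (s.startswith('DC') or s in EEGLabels or 'm' in s
--                    or any(x in s for x in miscLabels))
--         if not special:
--             keep.append(i)
--     return keep
-- ===== Notes on version B (the rewrite author's own statement) =====
-- stated objective: simpler
-- what changed: Replaces the four category-list builds plus membership in their concatenation by a single enumerate pass with one combined is-special predicate per label, and replaces the NameType list + float ratio by an integer count comparison; the empty input, on which A divides by zero, is excluded by Pre_ and B returns [] there.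
-- crash fix: On the empty list A raises ZeroDivisionError (len(NameType) is 0); B returns []. — e.g. on select_BLAES_macros([]): A raises ZeroDivisionError, B returns []
import Mathlib
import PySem

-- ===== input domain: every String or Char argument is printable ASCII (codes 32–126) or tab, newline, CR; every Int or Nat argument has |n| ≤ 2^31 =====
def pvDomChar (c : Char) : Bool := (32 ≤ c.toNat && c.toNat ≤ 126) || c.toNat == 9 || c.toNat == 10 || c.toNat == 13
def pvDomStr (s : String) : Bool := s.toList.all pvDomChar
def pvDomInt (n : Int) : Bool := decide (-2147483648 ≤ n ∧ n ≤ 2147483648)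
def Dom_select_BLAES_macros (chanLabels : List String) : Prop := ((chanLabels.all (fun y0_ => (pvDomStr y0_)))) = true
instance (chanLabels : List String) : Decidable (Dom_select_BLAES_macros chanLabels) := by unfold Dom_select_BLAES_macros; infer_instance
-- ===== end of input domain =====

-- B folds A's four category scans + concatenated-membership test into one pass with a
-- combined per-label predicate (simpler; return value only, no mutation involved).

-- shared literal constants of the source
def pvMisc : List String := ["GND", "PD", "Sync", "EMPTY", "REF", "EKG", "chan", "_"]
def pvEEGFull : List String := ["FP1", "Fp1", "AF3", "F3", "F7", "F9", "FC5", "FC1", "FP2", "Fp2", "AF4", "F4", "F8", "F10", "FC6", "FC2", "T7", "C3", "CP5", "CP1", "P3", "P7", "PO3", "PO7", "T8", "C4", "CP6", "CP2", "P4", "P8", "PO4", "PO8", "O1", "O2", "A1", "A2", "FZ", "CZ", "PZ", "FPZ", "OZ", "Cz", "Fz", "Pz", "Oz"]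
def pvEEGReduced : List String := ["Fp1", "Fp2", "CZ", "Cz", "FPZ", "FZ", "Fz", "PZ", "Pz", "OZ", "Oz", "T7", "T8"]

-- ===== PORT A =====
def select_BLAES_macros (chanLabels : List String) : List Int :=
  let miscLabels := pvMisc
  let DCChans := chanLabels.filter (fun s => PySem.Str.startswith s "DC")
  let EEGLabels0 := pvEEGFull
  let NameType : List Int := (PySem.List.pyRange 0 (PySem.List.len chanLabels) 1).foldl
    (fun acc i =>
      if PySem.Str.isIn "L" (PySem.List.pyGetD chanLabels i "") ||
         PySem.Str.isIn "R" (PySem.List.pyGetD chanLabels i "") then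
        acc ++ [(1 : Int)] else acc ++ [(0 : Int)]) []
  -- the float test sum/len < 0.5 is exact as 2*sum < len (|values| ≤ 2^31, far below float precision loss)
  let EEGLabels := if 2 * NameType.sum < PySem.List.len chanLabels then
      let _dead := EEGLabels0.map PySem.Str.lower   -- the source's immediately overwritten reassignment
      pvEEGReduced
    else EEGLabels0
  let EEGChans := chanLabels.filter (fun s => EEGLabels.any (fun xs => xs == s))
  let miscChans := chanLabels.filter (fun s => miscLabels.any (fun xs => PySem.Str.isIn xs s))
  let microChans := chanLabels.filter (fun s => PySem.Str.isIn "m" s)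
  let specialChans := EEGChans ++ microChans ++ miscChans ++ DCChans
  ((PySem.List.enumerate chanLabels).filter (fun p => !(specialChans.contains p.2))).map (·.1)

-- ===== PORT B =====
def pvSpecial (eeg : List String) (s : String) : Bool :=
  PySem.Str.startswith s "DC" || eeg.contains s || PySem.Str.isIn "m" s ||
    pvMisc.any (fun x => PySem.Str.isIn x s)

def select_BLAES_macros_alt (chanLabels : List String) : List Int :=
  let lr := (chanLabels.filter (fun s => PySem.Str.isIn "L" s || PySem.Str.isIn "R" s)).length
  let EEGLabels := if 2 * lr ≥ chanLabels.length then pvEEGFull else pvEEGReduced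
  (PySem.List.enumerate chanLabels).foldl
    (fun acc p => if !(pvSpecial EEGLabels p.2) then acc ++ [p.1] else acc) []

-- ===== PRECONDITION & SPEC =====
-- Pre_ excludes only the empty list, on which A raises ZeroDivisionError (len(NameType) = 0).
def Pre_select_BLAES_macros (chanLabels : List String) : Prop := chanLabels ≠ []
instance (chanLabels : List String) : Decidable (Pre_select_BLAES_macros chanLabels) := by
  unfold Pre_select_BLAES_macros; infer_instance
def pvWitness_select_BLAES_macros : List String := ["RA1"]

-- On the empty list A raises ZeroDivisionError; B returns [].
def Raises_select_BLAES_macros (chanLabels : List String) : Prop := chanLabels = []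
instance (chanLabels : List String) : Decidable (Raises_select_BLAES_macros chanLabels) := by
  unfold Raises_select_BLAES_macros; infer_instance
def pvRaiseWitness_select_BLAES_macros : List String := []
def pvRaiseWitnessOut_select_BLAES_macros : List Int := []

def Spec_select_BLAES_macros (chanLabels : List String) (out : List Int) : Prop :=
  out = select_BLAES_macros_alt chanLabels
instance (chanLabels : List String) (out : List Int) : Decidable (Spec_select_BLAES_macros chanLabels out) := by
  unfold Spec_select_BLAES_macros; infer_instance

-- ===== CLAIM (what is proved, stated in full; the proofs are below) =====
def Claim_equal_select_BLAES_macros : Prop := ∀ (chanLabels : List String),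
  Dom_select_BLAES_macros chanLabels → Pre_select_BLAES_macros chanLabels →
  Spec_select_BLAES_macros chanLabels (select_BLAES_macros chanLabels)

def Claim_raises_select_BLAES_macros : Prop :=
  (∀ (chanLabels : List String), Dom_select_BLAES_macros chanLabels →
    Raises_select_BLAES_macros chanLabels → ¬ Pre_select_BLAES_macros chanLabels) ∧
  (Dom_select_BLAES_macros (pvRaiseWitness_select_BLAES_macros) ∧
   Raises_select_BLAES_macros (pvRaiseWitness_select_BLAES_macros) ∧
   select_BLAES_macros_alt (pvRaiseWitness_select_BLAES_macros) = pvRaiseWitnessOut_select_BLAES_macros)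

-- ===== LEMMAS AND PROOFS =====

-- sum of the NameType-style fold counts the labels satisfying the predicate
theorem pv_sum_fold (p : String → Bool) (l : List String) (acc : List Int) :
    (l.foldl (fun acc s => if p s then acc ++ [(1 : Int)] else acc ++ [(0 : Int)]) acc).sum
      = acc.sum + (l.filter p).length := by
  induction l generalizing acc with
  | nil => simp
  | cons x xs ih =>
    by_cases h : p x = true
    · simp [h, ih]; ring
    · simp [h, ih]

-- membership in the concatenated special list equals the combined predicate, for labels of the list
theorem pv_special_mem (eeg : List String) (chanLabels : List String) (s : String)
    (hs : s ∈ chanLabels) :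
    ((chanLabels.filter (fun s => eeg.any (fun xs => xs == s)) ++
      chanLabels.filter (fun s => PySem.Str.isIn "m" s) ++
      chanLabels.filter (fun s => pvMisc.any (fun xs => PySem.Str.isIn xs s)) ++
      chanLabels.filter (fun s => PySem.Str.startswith s "DC")).contains s)
      = pvSpecial eeg s := by
  rw [Bool.eq_iff_iff]
  simp only [List.contains_iff_mem, List.mem_append, List.mem_filter, pvSpecial,
    Bool.or_eq_true, List.any_eq_true, beq_iff_eq, exists_eq_right, hs, true_and]
  constructor
  · rintro (((a|b)|c)|d)
    exacts [Or.inl (Or.inl (Or.inr a)), Or.inl (Or.inr b), Or.inr c, Or.inl (Or.inl (Or.inl d))]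
  · rintro (((a|b)|c)|d)
    exacts [Or.inr a, Or.inl (Or.inl (Or.inl b)), Or.inl (Or.inl (Or.inr c)), Or.inl (Or.inr d)]

theorem pv_main (chanLabels : List String) :
    select_BLAES_macros chanLabels = select_BLAES_macros_alt chanLabels := by
  simp only [select_BLAES_macros, select_BLAES_macros_alt]
  rw [PySem.List.foldl_pyRange_zero_pyGetD chanLabels ""
      (fun acc s => if PySem.Str.isIn "L" s || PySem.Str.isIn "R" s then acc ++ [(1:Int)] else acc ++ [(0:Int)]) []]
  rw [pv_sum_fold (fun s => PySem.Str.isIn "L" s || PySem.Str.isIn "R" s) chanLabels []]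
  rw [PySem.List.foldl_append_if]
  set lr := (chanLabels.filter (fun s => PySem.Str.isIn "L" s || PySem.Str.isIn "R" s)).length with hlr
  have hkeep : ∀ eeg : List String,
      ((PySem.List.enumerate chanLabels 0).filter
        (fun p : Int × String => !((chanLabels.filter (fun s => eeg.any (fun xs => xs == s)) ++
          chanLabels.filter (fun s => PySem.Str.isIn "m" s) ++
          chanLabels.filter (fun s => pvMisc.any (fun xs => PySem.Str.isIn xs s)) ++
          chanLabels.filter (fun s => PySem.Str.startswith s "DC")).contains p.2))).map (fun p : Int × String => p.1)
      = ((PySem.List.enumerate chanLabels 0).filter (fun p : Int × String => !(pvSpecial eeg p.2))).map (fun p : Int × String => p.1) := by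
    intro eeg
    congr 1
    apply List.filter_congr
    intro p hp
    have hmem : p.2 ∈ chanLabels := by
      rcases (PySem.List.mem_enumerate_iff chanLabels 0 p).mp hp with ⟨k, hk, rfl⟩
      simp
    rw [pv_special_mem eeg chanLabels p.2 hmem]
  by_cases hge : 2 * lr ≥ chanLabels.length
  · rw [if_neg (by simp only [PySem.List.len_eq, List.sum_nil]; omega), if_pos hge]
    simpa using hkeep pvEEGFull
  · rw [if_pos (by simp only [PySem.List.len_eq, List.sum_nil]; omega), if_neg hge]
    simpa using hkeep pvEEGReduced

-- ===== VERDICT (by name: the statement is the Claim_ definition above) =====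
theorem select_BLAES_macros_spec : Claim_equal_select_BLAES_macros := by
  intro chanLabels _ _
  exact pv_main chanLabels

@[simp]
theorem select_BLAES_macros_raises : Claim_raises_select_BLAES_macros := by
  unfold Claim_raises_select_BLAES_macros
  exact ⟨fun _ _ h => by simpa [Pre_select_BLAES_macros, Raises_select_BLAES_macros] using h, by decide⟩
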